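-- pv_equiv track=rewrite | github.com/boatzaa1456/MayFlyAlgorithm_boat.py | MayFlyAlgorithmDemo1.py | cut_all_arc_sols
-- ===== SOURCE A (Python) =====
-- def cut_all_arc_sols(arc_sols_male, arc_sols_female):
--     def cut_arc_sol(arc_sol):
--         arc_sol_dict = {}
--         for arc in arc_sol:
--             if arc[0] not in arc_sol_dict:
--                 arc_sol_dict[arc[0]] = set()
--             if arc[1] not in arc_sol_dict:
--                 arc_sol_dict[arc[1]] = set()
--             arc_sol_dict[arc[0]].add(arc)
--             arc_sol_dict[arc[1]].add(arc)
--
--         return [arc_sol_dict.get(item, set()) for item in range(max(arc_sol_dict.keys()) + 1)]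
--
--     cut_arc_sol_male = [cut_arc_sol(arc_sol) for arc_sol in arc_sols_male]
--     cut_arc_sol_female = [cut_arc_sol(arc_sol) for arc_sol in arc_sols_female]
--
--     return cut_arc_sol_male, cut_arc_sol_female
-- ===== SOURCE B (Python) =====
-- def cut_all_arc_sols(arc_sols_male, arc_sols_female):
--     def cut_arc_sol(arc_sol):
--         top = max(n for arc in arc_sol for n in arc)
--         return [{arc for arc in arc_sol if node in arc} for node in range(top + 1)]
--
--     return ([cut_arc_sol(s) for s in arc_sols_male],
--             [cut_arc_sol(s) for s in arc_sols_female])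
-- ===== Notes on version B (the rewrite author's own statement) =====
-- stated objective: simpler
-- what changed: B drops A's mutable dict-of-sets grouping pass entirely: it takes the max over all arc endpoints directly and builds each node's incident-arc set by a per-node comprehension over the arcs, with no intermediate dict and no second lookup pass.
import Mathlib
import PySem

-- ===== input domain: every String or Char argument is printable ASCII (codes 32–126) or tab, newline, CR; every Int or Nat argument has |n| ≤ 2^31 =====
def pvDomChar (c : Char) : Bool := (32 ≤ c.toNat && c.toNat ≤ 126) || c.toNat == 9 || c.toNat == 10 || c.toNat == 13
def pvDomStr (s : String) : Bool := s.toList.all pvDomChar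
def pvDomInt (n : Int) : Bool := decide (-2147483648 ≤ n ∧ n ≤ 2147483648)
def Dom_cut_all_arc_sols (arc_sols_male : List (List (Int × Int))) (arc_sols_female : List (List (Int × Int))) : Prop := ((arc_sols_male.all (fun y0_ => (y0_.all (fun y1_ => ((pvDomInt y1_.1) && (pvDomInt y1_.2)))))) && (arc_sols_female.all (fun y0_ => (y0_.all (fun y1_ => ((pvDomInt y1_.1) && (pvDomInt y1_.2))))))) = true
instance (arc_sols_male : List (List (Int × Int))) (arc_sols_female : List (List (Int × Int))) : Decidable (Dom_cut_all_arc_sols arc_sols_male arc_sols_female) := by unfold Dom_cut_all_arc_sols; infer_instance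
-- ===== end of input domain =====

-- B replaces A's mutable dict-of-sets grouping pass with a direct per-node set comprehension over the arcs (objective: simpler; not faster).

-- ===== PORT A =====
def pvStepA (d : PySem.Dict Int (List (Int × Int))) (arc : Int × Int) : PySem.Dict Int (List (Int × Int)) :=
  let d1 := if d.contains arc.1 then d else d.insert arc.1 PySem.Set.empty
  let d2 := if d1.contains arc.2 then d1 else d1.insert arc.2 PySem.Set.empty
  let d3 := d2.modify arc.1 PySem.Set.empty (fun s => PySem.Set.add s arc)
  d3.modify arc.2 PySem.Set.empty (fun s => PySem.Set.add s arc)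
def pvCutA (arc_sol : List (Int × Int)) : List (List (Int × Int)) :=
  match PySem.List.max? (arc_sol.foldl pvStepA PySem.Dict.empty).keys (fun k => k) with
  | none => []
  | some m => (PySem.List.pyRange 0 (m + 1) 1).map (fun item =>
      (arc_sol.foldl pvStepA PySem.Dict.empty).getD item PySem.Set.empty)

def cut_all_arc_sols (arc_sols_male : List (List (Int × Int))) (arc_sols_female : List (List (Int × Int))) : (List (List (List (Int × Int)))) × (List (List (List (Int × Int)))) :=
  (arc_sols_male.map pvCutA, arc_sols_female.map pvCutA)

-- ===== PORT B =====
def pvCutB (arc_sol : List (Int × Int)) : List (List (Int × Int)) :=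
  match PySem.List.max? (arc_sol.flatMap (fun arc => [arc.1, arc.2])) (fun n => n) with
  | none => []
  | some top => (PySem.List.pyRange 0 (top + 1) 1).map (fun node =>
      PySem.Set.ofList (arc_sol.filter (fun arc => node == arc.1 || node == arc.2)))


def cut_all_arc_sols_alt (arc_sols_male : List (List (Int × Int))) (arc_sols_female : List (List (Int × Int))) : (List (List (List (Int × Int)))) × (List (List (List (Int × Int)))) :=
  (arc_sols_male.map pvCutB, arc_sols_female.map pvCutB)

-- ===== PRECONDITION & SPEC =====
-- Pre_ excludes exactly the inputs containing an empty arc solution, on which both Pythons raise ValueError (max() of an empty sequence).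
def Pre_cut_all_arc_sols (arc_sols_male : List (List (Int × Int))) (arc_sols_female : List (List (Int × Int))) : Prop :=
  (∀ s ∈ arc_sols_male, s ≠ []) ∧ (∀ s ∈ arc_sols_female, s ≠ [])
instance (arc_sols_male : List (List (Int × Int))) (arc_sols_female : List (List (Int × Int))) : Decidable (Pre_cut_all_arc_sols arc_sols_male arc_sols_female) := by unfold Pre_cut_all_arc_sols; infer_instance

def pvWitness_cut_all_arc_sols : (List (List (Int × Int))) × (List (List (Int × Int))) := ([[(0, 1), (1, 2)]], [[(0, 0)]])

def Spec_cut_all_arc_sols (arc_sols_male : List (List (Int × Int))) (arc_sols_female : List (List (Int × Int))) (out : (List (List (List (Int × Int)))) × (List (List (List (Int × Int))))) : Prop := out = cut_all_arc_sols_alt arc_sols_male arc_sols_female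
instance (arc_sols_male : List (List (Int × Int))) (arc_sols_female : List (List (Int × Int))) (out : (List (List (List (Int × Int)))) × (List (List (List (Int × Int))))) : Decidable (Spec_cut_all_arc_sols arc_sols_male arc_sols_female out) := by unfold Spec_cut_all_arc_sols; infer_instance

-- ===== CLAIM (what is proved, stated in full; the proofs are below) =====
def Claim_equal_cut_all_arc_sols : Prop := ∀ (arc_sols_male : List (List (Int × Int))) (arc_sols_female : List (List (Int × Int))), Dom_cut_all_arc_sols arc_sols_male arc_sols_female → Pre_cut_all_arc_sols arc_sols_male arc_sols_female → Spec_cut_all_arc_sols arc_sols_male arc_sols_female (cut_all_arc_sols arc_sols_male arc_sols_female)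

-- ===== LEMMAS AND PROOFS =====
theorem pvStepA_contains (d : PySem.Dict Int (List (Int × Int))) (a : Int × Int) (k : Int) :
    (pvStepA d a).contains k = (k == a.1 || k == a.2 || d.contains k) := by
  unfold pvStepA
  simp only [PySem.Dict.contains_modify]
  split_ifs <;> by_cases hk1 : k = a.1 <;> by_cases hk2 : k = a.2 <;>
    (try simp_all [PySem.Dict.contains_insert]) <;>
    (try cases hb1 : (k == a.1) <;> cases hb2 : (k == a.2) <;> simp_all)

theorem pvStepA_getD (d : PySem.Dict Int (List (Int × Int))) (a : Int × Int) (i : Int) :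
    (pvStepA d a).getD i PySem.Set.empty =
      if (i == a.1 || i == a.2) then PySem.Set.add (d.getD i PySem.Set.empty) a
      else d.getD i PySem.Set.empty := by
  unfold pvStepA
  simp only [PySem.Dict.getD_modify]
  split_ifs <;>
    (try simp_all [PySem.Dict.getD_insert, PySem.Dict.getD_of_not_contains,
      PySem.Dict.contains_insert, PySem.Set.add, PySem.Set.contains]) <;>
    split_ifs <;> simp_all

theorem pvLoopA_getD (l : List (Int × Int)) (d : PySem.Dict Int (List (Int × Int))) (i : Int) :
    (l.foldl pvStepA d).getD i PySem.Set.empty =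
      (l.filter (fun arc => i == arc.1 || i == arc.2)).foldl PySem.Set.add (d.getD i PySem.Set.empty) := by
  induction l generalizing d with
  | nil => rfl
  | cons a t ih =>
    simp only [List.foldl_cons, List.filter_cons, ih (pvStepA d a), pvStepA_getD]
    split_ifs <;> simp_all

theorem pvLoopA_contains (l : List (Int × Int)) (d : PySem.Dict Int (List (Int × Int))) (k : Int) :
    (l.foldl pvStepA d).contains k = true ↔
      (d.contains k = true ∨ k ∈ l.flatMap (fun arc => [arc.1, arc.2])) := by
  induction l generalizing d with
  | nil => simp
  | cons a t ih =>
    rw [List.foldl_cons, ih (pvStepA d a), pvStepA_contains]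
    simp only [Bool.or_eq_true, beq_iff_eq, List.flatMap_cons, List.mem_cons, List.mem_append]
    tauto

theorem pvMax?_congr (xs ys : List Int) (h : ∀ x, x ∈ xs ↔ x ∈ ys) :
    PySem.List.max? xs (fun y => y) = PySem.List.max? ys (fun y => y) := by
  match xs, ys with
  | [], [] => rfl
  | [], y :: t => exact absurd ((h y).mpr (List.mem_cons_self)) (List.not_mem_nil)
  | x :: t, [] => exact absurd ((h x).mp (List.mem_cons_self)) (List.not_mem_nil)
  | x :: t, y :: s =>
    rw [PySem.List.max?_id_cons, PySem.List.max?_id_cons]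
    congr 1
    have hm1 : t.foldl max x ∈ x :: t := by
      rcases PySem.List.foldl_max_mem t x with h1 | h1
      · rw [h1]; exact List.mem_cons_self
      · exact List.mem_cons_of_mem _ h1
    have hm2 : s.foldl max y ∈ y :: s := by
      rcases PySem.List.foldl_max_mem s y with h1 | h1
      · rw [h1]; exact List.mem_cons_self
      · exact List.mem_cons_of_mem _ h1
    have le1 : ∀ z ∈ x :: t, z ≤ t.foldl max x := by
      intro z hz
      rcases List.mem_cons.mp hz with rfl | hz
      · exact (PySem.List.le_foldl_max t z).1
      · exact (PySem.List.le_foldl_max t x).2 z hz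
    have le2 : ∀ z ∈ y :: s, z ≤ s.foldl max y := by
      intro z hz
      rcases List.mem_cons.mp hz with rfl | hz
      · exact (PySem.List.le_foldl_max s z).1
      · exact (PySem.List.le_foldl_max s y).2 z hz
    exact le_antisymm (le2 _ ((h _).mp hm1)) (le1 _ ((h _).mpr hm2))

theorem pvCutA_eq_pvCutB (arc_sol : List (Int × Int)) : pvCutA arc_sol = pvCutB arc_sol := by
  unfold pvCutA pvCutB
  have hkeys : ∀ x, x ∈ (arc_sol.foldl pvStepA PySem.Dict.empty).keys ↔
      x ∈ arc_sol.flatMap (fun arc => [arc.1, arc.2]) := by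
    intro x
    rw [← PySem.Dict.contains_iff_mem_keys, pvLoopA_contains]
    simp
  rw [pvMax?_congr _ _ hkeys]
  cases PySem.List.max? (arc_sol.flatMap (fun arc => [arc.1, arc.2])) (fun n => n) with
  | none => rfl
  | some top =>
    apply List.map_congr_left
    intro i _
    rw [pvLoopA_getD]
    simp [PySem.Set.ofList_eq_foldl, PySem.Dict.getD_empty]

-- ===== VERDICT (by name: the statement is the Claim_ definition above) =====
theorem cut_all_arc_sols_spec : Claim_equal_cut_all_arc_sols := by
  intro m f _ _
  unfold Spec_cut_all_arc_sols cut_all_arc_sols cut_all_arc_sols_alt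
  simp [pvCutA_eq_pvCutB]
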